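-- pv_equiv track=rewrite | github.com/MrBrantCode/unitest_baseline | mut_generate/mist_train_taco/taco_3966/solution.py | find_peacekeeping_mission_interval
-- ===== SOURCE A (Python) =====
-- def find_peacekeeping_mission_interval(n, m, lightsabers, desired_counts):
--     INF = 1 << 60
--     Constraint = [0] + desired_counts
--     pos = 0
--     satisfied_color = 0
--
--     for i in range(1, m + 1):
--         if Constraint[i] == 0:
--             satisfied_color += 1
--
--     GETCOLOR = [0] * (n + 1)
--     ans = INF
--     waste = 0
--
--     for i in range(n):
--         while satisfied_color < m and pos < n:
--             now_color = lightsabers[pos]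
--             GETCOLOR[now_color] += 1
--             if GETCOLOR[now_color] == Constraint[now_color]:
--                 satisfied_color += 1
--             elif GETCOLOR[now_color] > Constraint[now_color]:
--                 waste += 1
--             pos += 1
--
--         if satisfied_color == m:
--             ans = min(ans, waste)
--
--         removed_color = lightsabers[i]
--         if GETCOLOR[removed_color] > Constraint[removed_color]:
--             GETCOLOR[removed_color] -= 1
--             waste -= 1
--             continue
--         elif GETCOLOR[removed_color] == Constraint[removed_color]:
--             GETCOLOR[removed_color] -= 1
--             satisfied_color -= 1
--
--     if ans < INF:
--         return "YES"
--     else: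
--         return "NO"
-- ===== SOURCE B (Python) =====
-- def find_peacekeeping_mission_interval(n, m, lightsabers, desired_counts):
--     # Tally the first n lightsabers once; a valid interval exists iff there is at
--     # least one candidate start (n > 0) and the whole array meets every demand.
--     cnt = {}
--     for i in range(n):
--         c = lightsabers[i]
--         cnt[c] = cnt.get(c, 0) + 1
--     if n > 0 and all(cnt.get(j + 1, 0) >= desired_counts[j] for j in range(m)):
--         return "YES"
--     return "NO"
-- ===== Notes on version B (the rewrite author's own statement) =====
-- stated objective: simpler
-- what changed: Replaces the two-pointer sliding window with GETCOLOR/waste/satisfied bookkeeping and a min-waste search by a single dict tally of the first n lightsabers followed by one threshold check per color (plus the existence of a candidate start, n > 0).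
-- outside the precondition, e.g. on find_peacekeeping_mission_interval(2, 1, [2, 2], [3, 1]): A returns 'YES', B returns 'NO'; on find_peacekeeping_mission_interval(1, 1, [1], [-1]): A returns 'NO', B returns 'YES'; on find_peacekeeping_mission_interval(2, 2, [-1, 1], [1, 1]): A returns 'YES', B returns 'NO'
import Mathlib
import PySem

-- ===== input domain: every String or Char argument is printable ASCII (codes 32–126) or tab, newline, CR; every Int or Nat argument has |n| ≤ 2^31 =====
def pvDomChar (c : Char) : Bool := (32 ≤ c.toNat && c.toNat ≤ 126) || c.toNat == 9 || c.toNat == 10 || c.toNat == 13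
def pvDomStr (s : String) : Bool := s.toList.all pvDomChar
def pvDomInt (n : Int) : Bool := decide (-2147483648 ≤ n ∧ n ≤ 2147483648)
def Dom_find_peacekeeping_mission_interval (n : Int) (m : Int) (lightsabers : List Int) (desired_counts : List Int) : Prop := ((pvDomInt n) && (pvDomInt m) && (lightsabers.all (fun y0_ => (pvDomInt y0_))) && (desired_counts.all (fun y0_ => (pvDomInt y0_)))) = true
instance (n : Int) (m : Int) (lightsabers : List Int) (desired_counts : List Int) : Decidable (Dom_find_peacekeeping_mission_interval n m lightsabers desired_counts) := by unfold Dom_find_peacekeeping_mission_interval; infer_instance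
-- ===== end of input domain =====

-- B replaces A's two-pointer sliding window (GETCOLOR/waste/satisfied bookkeeping, min-waste
-- search) by one dict tally of the first n lightsabers plus one threshold check per color,
-- answering YES iff a candidate start exists (n > 0) and every demand is met
-- (objective: simpler); same O(n+m) cost.

-- ===== PORT A =====
-- the inner `while satisfied < m and pos < n` loop; fuel = (n - pos).toNat is exactly the
-- number of remaining positions, so fuel 0 means the loop condition is false.
-- pyGetD/pySetD are the total forms of xs[i] / xs[i] = v: exact under Pre_ (all indices in range).
def pvWhileA (L C : List Int) (n m : Int) :
    Nat → Int → Int → Int → List Int → Int × Int × Int × List Int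
  | 0, pos, satisfied, waste, G => (pos, satisfied, waste, G)
  | fuel+1, pos, satisfied, waste, G =>
    if satisfied < m ∧ pos < n then
      let c := PySem.List.pyGetD L pos 0
      let gc := PySem.List.pyGetD G c 0 + 1
      let G' := PySem.List.pySetD G c gc
      let tc := PySem.List.pyGetD C c 0
      if gc = tc then pvWhileA L C n m fuel (pos + 1) (satisfied + 1) waste G'
      else if gc > tc then pvWhileA L C n m fuel (pos + 1) satisfied (waste + 1) G'
      else pvWhileA L C n m fuel (pos + 1) satisfied waste G'
    else (pos, satisfied, waste, G)

-- one iteration of `for i in range(n)`: run the while loop, record the answer, remove lightsabers[i]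
def pvStepA (L C : List Int) (n m : Int)
    (st : Int × Int × Int × Int × List Int) (i : Int) : Int × Int × Int × Int × List Int :=
  let r := pvWhileA L C n m (n - st.1).toNat st.1 st.2.1 st.2.2.1 st.2.2.2.2
  let pos := r.1
  let satisfied := r.2.1
  let waste := r.2.2.1
  let G := r.2.2.2
  let ans := if satisfied = m then min st.2.2.2.1 waste else st.2.2.2.1
  let c := PySem.List.pyGetD L i 0
  let gc := PySem.List.pyGetD G c 0
  let tc := PySem.List.pyGetD C c 0
  if gc > tc then (pos, satisfied, waste - 1, ans, PySem.List.pySetD G c (gc - 1))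
  else if gc = tc then (pos, satisfied - 1, waste, ans, PySem.List.pySetD G c (gc - 1))
  else (pos, satisfied, waste, ans, G)

def find_peacekeeping_mission_interval (n : Int) (m : Int) (lightsabers : List Int) (desired_counts : List Int) : String :=
  let C : List Int := 0 :: desired_counts
  let satisfied0 : Int :=
    (PySem.List.pyRange 1 (m + 1) 1).foldl
      (fun s i => if PySem.List.pyGetD C i 0 = 0 then s + 1 else s) 0
  let G0 : List Int := List.replicate (n + 1).toNat 0
  let st :=
    (PySem.List.pyRange 0 n 1).foldl (pvStepA lightsabers C n m)
      (0, satisfied0, 0, (1 : Int) <<< 60, G0)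
  if st.2.2.2.1 < (1 : Int) <<< 60 then "YES" else "NO"

-- ===== PORT B =====
def find_peacekeeping_mission_interval_alt (n : Int) (m : Int) (lightsabers : List Int) (desired_counts : List Int) : String :=
  let cnt : PySem.Dict Int Int :=
    (PySem.List.pyRange 0 n 1).foldl
      (fun d i =>
        let c := PySem.List.pyGetD lightsabers i 0
        d.insert c (d.getD c 0 + 1))
      PySem.Dict.empty
  if 0 < n ∧ (PySem.List.pyRange 0 m 1).all
      (fun j => PySem.List.pyGetD desired_counts j 0 ≤ cnt.getD (j + 1) 0)
  then "YES" else "NO"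

-- ===== PRECONDITION & SPEC =====
-- Pre_ restricts to the task's natural domain: m ≤ len(desired_counts) always, and when any
-- lightsaber is read (n > 0) also 0 ≤ m, at least n lightsabers, colors in 1..m and ≤ n, and
-- nonnegative desired counts. Outside it A either raises IndexError or returns values that are
-- accidents of its table encoding (negative colors wrap around Python indices; a color c with
-- m < c counts toward `satisfied` though it is not one of the m required colors; a negative
-- desired count is an equality target counts can never reach) — corners on which B's plain
-- counting answer is as defensible as A's.
def Pre_find_peacekeeping_mission_interval (n : Int) (m : Int) (lightsabers : List Int) (desired_counts : List Int) : Prop :=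
  m ≤ desired_counts.length ∧
  (0 < n → (0 ≤ m ∧ n ≤ lightsabers.length ∧
    (∀ c ∈ lightsabers.take n.toNat, 1 ≤ c ∧ c ≤ m ∧ c ≤ n) ∧
    (∀ d ∈ desired_counts.take m.toNat, 0 ≤ d)))
instance (n : Int) (m : Int) (lightsabers : List Int) (desired_counts : List Int) : Decidable (Pre_find_peacekeeping_mission_interval n m lightsabers desired_counts) := by unfold Pre_find_peacekeeping_mission_interval; infer_instance

def pvWitness_find_peacekeeping_mission_interval : Int × Int × List Int × List Int := (3, 2, [1, 2, 1], [1, 1])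

def Spec_find_peacekeeping_mission_interval (n : Int) (m : Int) (lightsabers : List Int) (desired_counts : List Int) (out : String) : Prop := out = find_peacekeeping_mission_interval_alt n m lightsabers desired_counts
instance (n : Int) (m : Int) (lightsabers : List Int) (desired_counts : List Int) (out : String) : Decidable (Spec_find_peacekeeping_mission_interval n m lightsabers desired_counts out) := by unfold Spec_find_peacekeeping_mission_interval; infer_instance

-- ===== CLAIM (what is proved, stated in full; the proofs are below) =====
def Claim_equal_find_peacekeeping_mission_interval : Prop := ∀ (n : Int) (m : Int) (lightsabers : List Int) (desired_counts : List Int), Dom_find_peacekeeping_mission_interval n m lightsabers desired_counts → Pre_find_peacekeeping_mission_interval n m lightsabers desired_counts → Spec_find_peacekeeping_mission_interval n m lightsabers desired_counts (find_peacekeeping_mission_interval n m lightsabers desired_counts)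

-- ===== LEMMAS AND PROOFS =====

-- number of required colors j+1 (j < m) whose count in the window W has reached its target
def pvSat (m : Int) (D : List Int) (W : List Int) : Nat :=
  ((List.range m.toNat).filter (fun j => D.getD j 0 ≤ (W.count ((j : Int) + 1) : Int))).length

theorem countP_range_parts (M j0 : Nat) (hj0 : j0 < M) (p : Nat → Bool) :
    (List.range M).countP p = (List.range j0).countP p + (if p j0 then 1 else 0)
      + (List.range (M - (j0+1))).countP (fun x => p (j0 + 1 + x)) := by
  have h : M = (j0 + 1) + (M - (j0+1)) := by omega
  rw [h, List.range_add, List.countP_append, List.range_succ, List.countP_append,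
      List.countP_map]
  simp only [Function.comp_def, List.countP_cons, List.countP_nil]
  have h2 : j0 + 1 + (M - (j0+1)) - (j0+1) = M - (j0+1) := by omega
  rw [h2]
  split_ifs <;> omega

theorem pvSat_append (m : Int) (D W : List Int) (c : Int)
    (hmD : m ≤ D.length) (htgt : ∀ d ∈ D.take m.toNat, 0 ≤ d)
    (hc : 1 ≤ c) (hcm : c ≤ m) :
    (pvSat m D (W ++ [c]) : Int)
      = if (W.count c : Int) + 1 = D.getD (c.toNat - 1) 0
        then (pvSat m D W : Int) + 1 else (pvSat m D W : Int) := by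
  have hsat : ∀ V, pvSat m D V = (List.range m.toNat).countP
      (fun j => decide (D.getD j 0 ≤ (V.count ((j : Int) + 1) : Int))) := by
    intro V; simp [pvSat, List.countP_eq_length_filter]
  set j0 : Nat := c.toNat - 1 with hj0def
  have hj0 : j0 < m.toNat := by omega
  have hj0c : ((j0 : Int)) + 1 = c := by omega
  set p := fun j : Nat => decide (D.getD j 0 ≤ (W.count ((j : Int) + 1) : Int)) with hp
  set q := fun j : Nat => decide (D.getD j 0 ≤ ((W ++ [c]).count ((j : Int) + 1) : Int)) with hq
  have hagree : ∀ j, j ≠ j0 → p j = q j := by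
    intro j hne
    have hne' : ((j : Int)) + 1 ≠ c := by omega
    have hcount : (W ++ [c]).count ((j : Int) + 1) = W.count ((j : Int) + 1) := by
      rw [List.count_append]
      have : List.count ((j : Int) + 1) [c] = 0 := by
        simp [Ne.symm hne']
      omega
    simp only [hp, hq]; rw [hcount]
  have hcnt : (W ++ [c]).count c = W.count c + 1 := by
    simp [List.count_append]
  have hP := countP_range_parts m.toNat j0 hj0 p
  have hQ := countP_range_parts m.toNat j0 hj0 q
  have hside1 : (List.range j0).countP p = (List.range j0).countP q := by
    apply List.countP_congr; intro x hx
    rw [hagree x (by simp at hx; omega)]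
  have hside2 : (List.range (m.toNat - (j0+1))).countP (fun x => p (j0 + 1 + x))
      = (List.range (m.toNat - (j0+1))).countP (fun x => q (j0 + 1 + x)) := by
    apply List.countP_congr; intro x _
    rw [hagree (j0 + 1 + x) (by omega)]
  have hDj : D.getD (c.toNat - 1) 0 = D.getD j0 0 := by rw [hj0def]
  rw [hsat, hsat, hP, hQ, hDj, hside1, hside2]
  by_cases hcase : (W.count c : Int) + 1 = D.getD j0 0
  · have hpj0 : p j0 = false := by
      simp only [hp]; rw [hj0c]; exact decide_eq_false (by omega)
    have hqj0 : q j0 = true := by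
      simp only [hq]; rw [hj0c, hcnt]; exact decide_eq_true (by push_cast; omega)
    rw [hpj0, hqj0, if_pos hcase]; norm_num; omega
  · have hpq : q j0 = p j0 := by
      simp only [hp, hq]; rw [hj0c, hcnt]
      by_cases ht : D.getD j0 0 ≤ (W.count c : Int)
      · rw [decide_eq_true ht, decide_eq_true (by push_cast; omega)]
      · rw [decide_eq_false ht, decide_eq_false (by push_cast; omega)]
    rw [hpq, if_neg hcase]

theorem pvSat_le (m : Int) (D W : List Int) : pvSat m D W ≤ m.toNat := by
  simpa [pvSat] using (List.length_filter_le _ (List.range m.toNat))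

theorem pvSat_mono (m : Int) (D : List Int) (L : List Int) (a b : Nat) (hab : a ≤ b) :
    pvSat m D (L.take a) ≤ pvSat m D (L.take b) := by
  simp only [pvSat, ← List.countP_eq_length_filter]
  apply List.countP_mono_left
  intro j _ h
  have hcount : (L.take a).count ((j : Int) + 1) ≤ (L.take b).count ((j : Int) + 1) := by
    have hsub : (L.take a).Sublist (L.take b) := List.take_sublist_take_left hab
    exact hsub.count_le _
  simp only [decide_eq_true_eq] at h ⊢
  omega

theorem pvGetSet (G : List Int) (c c' v : Int) (hc : 0 ≤ c)
    (hc' : 0 ≤ c') (h' : c' < G.length) :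
    PySem.List.pyGetD (PySem.List.pySetD G c v) c' 0
      = if c' = c then v else PySem.List.pyGetD G c' 0 := by
  rw [PySem.List.pySetD_of_nonneg G v hc]
  rw [PySem.List.pyGetD_eq_getElem _ _ hc' (by simpa using h'),
      PySem.List.pyGetD_eq_getElem _ _ hc' h']
  rw [List.getElem_set]
  by_cases hcc : c' = c
  · simp [hcc]
  · have : c.toNat ≠ c'.toNat := by omega
    simp [this, hcc]

theorem C_getD (D : List Int) (c : Int) (hc : 1 ≤ c) (hcD : c ≤ D.length) :
    PySem.List.pyGetD (0 :: D) c 0 = D.getD (c.toNat - 1) 0 := by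
  have h2 : c.toNat - 1 < D.length := by omega
  rw [PySem.List.pyGetD_eq_getElem _ _ (by omega) (by simp; omega)]
  rw [List.getD_eq_getElem?_getD, List.getElem?_eq_getElem h2, Option.getD_some]
  rw [List.getElem_cons]
  simp [show ¬ c.toNat = 0 from by omega]

theorem whileA_inv (L D : List Int) (n m : Int)
    (hn : n ≤ L.length) (hm : 0 ≤ m) (hmD : m ≤ D.length)
    (hcol : ∀ c ∈ L.take n.toNat, 1 ≤ c ∧ c ≤ m ∧ c ≤ n)
    (htgt : ∀ d ∈ D.take m.toNat, 0 ≤ d) :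
    ∀ (fuel : Nat) (pos satisfied waste : Int) (G : List Int),
      fuel = (n - pos).toNat → 0 ≤ pos → pos ≤ n →
      G.length = (n+1).toNat →
      (∀ c : Int, 1 ≤ c → c ≤ m → c ≤ n →
        PySem.List.pyGetD G c 0 = ((L.take pos.toNat).count c : Int)) →
      satisfied = (pvSat m D (L.take pos.toNat) : Int) →
      waste ≤ pos →
      ∃ pos' sat' w' G', pvWhileA L (0 :: D) n m fuel pos satisfied waste G = (pos', sat', w', G') ∧
        pos ≤ pos' ∧ pos' ≤ n ∧ sat' = (pvSat m D (L.take pos'.toNat) : Int) ∧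
        w' ≤ pos' ∧ (sat' = m ∨ pos' = n) := by
  intro fuel
  induction fuel with
  | zero =>
    intro pos sat w G hf h0 hpn hlen hG hs hw
    refine ⟨pos, sat, w, G, rfl, le_refl _, hpn, hs, hw, Or.inr (by omega)⟩
  | succ fuel ih =>
    intro pos sat w G hf h0 hpn hlen hG hs hw
    show ∃ pos' sat' w' G', (if sat < m ∧ pos < n then _ else (pos, sat, w, G)) = _ ∧ _
    by_cases hcond : sat < m ∧ pos < n
    · rw [if_pos hcond]
      have hposlt : pos.toNat < n.toNat := by omega
      have hposL : pos.toNat < L.length := by omega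
      have hcL : PySem.List.pyGetD L pos 0 = L[pos.toNat] :=
        PySem.List.pyGetD_eq_getElem _ _ h0 (by omega)
      set c := PySem.List.pyGetD L pos 0 with hcdef
      have hcmem : c ∈ L.take n.toNat := by
        rw [hcL]
        rw [show L[pos.toNat] = (L.take n.toNat)[pos.toNat]'(by simp; omega) from
          (List.getElem_take).symm]
        exact List.getElem_mem _
      obtain ⟨hc1, hcm, hcn⟩ := hcol c hcmem
      have htake : L.take (pos+1).toNat = L.take pos.toNat ++ [c] := by
        have : (pos+1).toNat = pos.toNat + 1 := by omega
        rw [this, List.take_succ, List.getElem?_eq_getElem hposL]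
        simp [hcL]
      have hGc : PySem.List.pyGetD G c 0 = ((L.take pos.toNat).count c : Int) :=
        hG c hc1 hcm hcn
      have htc : PySem.List.pyGetD (0 :: D) c 0 = D.getD (c.toNat - 1) 0 :=
        C_getD D c hc1 (by omega)
      have hsa := pvSat_append m D (L.take pos.toNat) c hmD htgt hc1 hcm
      rw [← htake] at hsa
      have hG' : ∀ c' : Int, 1 ≤ c' → c' ≤ m → c' ≤ n →
          PySem.List.pyGetD (PySem.List.pySetD G c (PySem.List.pyGetD G c 0 + 1)) c' 0
            = ((L.take (pos+1).toNat).count c' : Int) := by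
        intro c' h1 h2 h3
        rw [pvGetSet G c c' _ (by omega) (by omega) (by rw [hlen]; omega)]
        by_cases hcc : c' = c
        · rw [if_pos hcc, hGc, htake, hcc]
          simp [List.count_append]
        · rw [if_neg hcc, hG c' h1 h2 h3, htake]
          have : List.count c' [c] = 0 := by simp [Ne.symm hcc]
          rw [List.count_append, this]
          simp
      have hlen' : (PySem.List.pySetD G c (PySem.List.pyGetD G c 0 + 1)).length
          = (n+1).toNat := by
        rw [PySem.List.pySetD_of_nonneg G _ (by omega)]
        simp [hlen]
      have hfuel' : fuel = (n - (pos+1)).toNat := by omega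
      by_cases heq : PySem.List.pyGetD G c 0 + 1 = PySem.List.pyGetD (0 :: D) c 0
      · rw [if_pos heq]
        have hsnew : sat + 1 = (pvSat m D (L.take (pos+1).toNat) : Int) := by
          rw [hsa, if_pos (by rw [← hGc, ← htc]; exact heq), hs]
        obtain ⟨pos', sat', w', G', hrun, hle, hn', hsat', hw', hd⟩ :=
          ih (pos+1) (sat+1) w _ hfuel' (by omega) (by omega) hlen' hG' hsnew (by omega)
        exact ⟨pos', sat', w', G', hrun, by omega, hn', hsat', hw', hd⟩
      · rw [if_neg heq]
        have hnoteq : ¬ (((L.take pos.toNat).count c : Int) + 1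
            = D.getD (c.toNat - 1) 0) := by
          rw [← hGc, ← htc]; exact heq
        have hsnew : sat = (pvSat m D (L.take (pos+1).toNat) : Int) := by
          rw [hsa, if_neg hnoteq, hs]
        by_cases hgt : PySem.List.pyGetD G c 0 + 1 > PySem.List.pyGetD (0 :: D) c 0
        · rw [if_pos hgt]
          obtain ⟨pos', sat', w', G', hrun, hle, hn', hsat', hw', hd⟩ :=
            ih (pos+1) sat (w+1) _ hfuel' (by omega) (by omega) hlen' hG' hsnew (by omega)
          exact ⟨pos', sat', w', G', hrun, by omega, hn', hsat', hw', hd⟩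
        · rw [if_neg hgt]
          obtain ⟨pos', sat', w', G', hrun, hle, hn', hsat', hw', hd⟩ :=
            ih (pos+1) sat w _ hfuel' (by omega) (by omega) hlen' hG' hsnew (by omega)
          exact ⟨pos', sat', w', G', hrun, by omega, hn', hsat', hw', hd⟩
    · rw [if_neg hcond]
      refine ⟨pos, sat, w, G, rfl, le_refl _, hpn, hs, hw, ?_⟩
      by_cases hpn' : pos = n
      · exact Or.inr hpn'
      · left
        have h1 : ¬ sat < m := by intro h; exact hcond ⟨h, by omega⟩
        have h2 : pvSat m D (L.take pos.toNat) ≤ m.toNat := pvSat_le m D _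
        omega

theorem stepA_ans_le (L C : List Int) (n m : Int)
    (st : Int × Int × Int × Int × List Int) (i : Int) :
    (pvStepA L C n m st i).2.2.2.1 ≤ st.2.2.2.1 := by
  obtain ⟨pos, sat, w, ans, G⟩ := st
  dsimp only [pvStepA]
  split_ifs <;> simp [min_le_right]

theorem foldl_ans_le (L C : List Int) (n m : Int) :
    ∀ (l : List Int) (st : Int × Int × Int × Int × List Int),
      ((l.foldl (pvStepA L C n m) st).2.2.2.1) ≤ st.2.2.2.1 := by
  intro l
  induction l with
  | nil => intro st; simp
  | cons x xs ih =>
    intro st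
    exact le_trans (ih _) (stepA_ans_le L C n m st x)

theorem stepA_frozen (L C : List Int) (n m : Int)
    (st : Int × Int × Int × Int × List Int) (i : Int)
    (h1 : st.1 = n) (h2 : st.2.1 < m) :
    (pvStepA L C n m st i).1 = n ∧ (pvStepA L C n m st i).2.1 < m ∧
      (pvStepA L C n m st i).2.2.2.1 = st.2.2.2.1 := by
  obtain ⟨pos, sat, w, ans, G⟩ := st
  simp only at h1 h2
  have hwr : pvWhileA L C n m (n - pos).toNat pos sat w G = (pos, sat, w, G) := by
    rw [h1, sub_self]; rfl
  dsimp only [pvStepA]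
  rw [hwr]
  have hansv : (if sat = m then min ans w else ans) = ans := if_neg (by omega)
  dsimp only
  rw [hansv]
  split_ifs <;>
    refine ⟨h1, ?_, rfl⟩ <;>
    first
      | exact (by omega : sat < m)
      | exact (by omega : sat - 1 < m)

theorem foldl_frozen (L C : List Int) (n m : Int) :
    ∀ (l : List Int) (st : Int × Int × Int × Int × List Int),
      st.1 = n → st.2.1 < m →
      (l.foldl (pvStepA L C n m) st).1 = n ∧
      (l.foldl (pvStepA L C n m) st).2.1 < m ∧
      (l.foldl (pvStepA L C n m) st).2.2.2.1 = st.2.2.2.1 := by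
  intro l
  induction l with
  | nil => intro st h1 h2; exact ⟨h1, h2, rfl⟩
  | cons x xs ih =>
    intro st h1 h2
    obtain ⟨g1, g2, g3⟩ := stepA_frozen L C n m st x h1 h2
    obtain ⟨f1, f2, f3⟩ := ih _ g1 g2
    simp only [List.foldl_cons]
    exact ⟨f1, f2, by rw [f3, g3]⟩


theorem tgt_nonneg (m : Int) (D : List Int) (htgt : ∀ d ∈ D.take m.toNat, 0 ≤ d)
    (j : Nat) (hj : j < m.toNat) (hmD : m ≤ D.length) : 0 ≤ D.getD j 0 := by
  have hlt : j < D.length := by omega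
  have heq : D.getD j 0 = (D.take m.toNat)[j]'(by simp; omega) := by
    simp [List.getD_eq_getElem?_getD, List.getElem?_eq_getElem hlt, List.getElem_take]
  rw [heq]; exact htgt _ (List.getElem_mem _)

theorem sat0_eq (m : Int) (D : List Int) (hm : 0 ≤ m) (hmD : m ≤ D.length)
    (htgt : ∀ d ∈ D.take m.toNat, 0 ≤ d) :
    (PySem.List.pyRange 1 (m + 1) 1).foldl
        (fun s i => if PySem.List.pyGetD (0 :: D) i 0 = 0 then s + 1 else s) (0 : Int)
      = (pvSat m D [] : Int) := by
  have h := PySem.List.foldl_count_if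
    (fun i => decide (PySem.List.pyGetD (0 :: D) i 0 = 0))
    (PySem.List.pyRange 1 (m + 1) 1) 0
  simp only [decide_eq_true_eq] at h
  rw [h, zero_add]
  rw [PySem.List.pyRange_one 1 (m + 1), List.countP_map]
  have hm1 : (m + 1 - 1).toNat = m.toNat := by omega
  rw [hm1]
  have hsat : pvSat m D [] = (List.range m.toNat).countP
      (fun j => decide (D.getD j 0 ≤ 0)) := by
    simp [pvSat, List.countP_eq_length_filter]
  rw [hsat]
  congr 1
  apply List.countP_congr
  intro j hj
  have hjm : j < m.toNat := by simpa using hj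
  have hC : PySem.List.pyGetD (0 :: D) (1 + (j : Int)) 0 = D.getD j 0 := by
    rw [C_getD D (1 + (j : Int)) (by omega) (by omega)]
    congr 1; omega
  have h0 : 0 ≤ D.getD j 0 := tgt_nonneg m D htgt j hjm hmD
  simp only [Function.comp_def, hC, decide_eq_true_eq]
  omega

theorem cntB_getD (n : Int) (L : List Int) (hn : n ≤ L.length) (v : Int) :
    ((PySem.List.pyRange 0 n 1).foldl
        (fun d i =>
          let c := PySem.List.pyGetD L i 0
          d.insert c (d.getD c 0 + 1)) PySem.Dict.empty).getD v 0
      = ((L.take n.toNat).count v : Int) := by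
  have hempty : (PySem.Dict.empty : PySem.Dict Int Int).getD v 0 = 0 := rfl
  by_cases hn0 : 0 < n
  · have hlen : (L.take n.toNat).length = n.toNat := by simp; omega
    have h1 : PySem.List.pyRange 0 n 1
        = PySem.List.pyRange 0 (PySem.List.len (L.take n.toNat)) 1 := by
      rw [PySem.List.len_eq, hlen]
      congr 1; omega
    rw [h1]
    rw [PySem.List.foldl_congr_mem _ _
      (fun d j => (fun (d' : PySem.Dict Int Int) (c : Int) =>
        d'.insert c (d'.getD c 0 + 1)) d (PySem.List.pyGetD (L.take n.toNat) j 0)) _ ?_]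
    · rw [PySem.List.foldl_pyRange_zero_pyGetD (L.take n.toNat) 0
        (fun (d' : PySem.Dict Int Int) (c : Int) => d'.insert c (d'.getD c 0 + 1))
        PySem.Dict.empty]
      rw [PySem.Dict.getD_foldl_insert_add_one, hempty, zero_add]
    · intro acc x hx
      rw [PySem.List.mem_pyRange_one, PySem.List.len_eq, hlen] at hx
      have hx2 : x.toNat < (L.take n.toNat).length := by omega
      have hg : PySem.List.pyGetD L x 0 = PySem.List.pyGetD (L.take n.toNat) x 0 := by
        rw [PySem.List.pyGetD_eq_getElem _ _ hx.1 (by omega),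
            PySem.List.pyGetD_eq_getElem _ _ hx.1 (by omega)]
        exact (List.getElem_take).symm
      dsimp only
      rw [hg]
  · have hnil : PySem.List.pyRange 0 n 1 = [] := PySem.List.pyRange_one_eq_nil (by omega)
    have htke : L.take n.toNat = [] := by
      have : n.toNat = 0 := by omega
      simp [this]
    rw [hnil, htke]
    simpa using hempty

theorem altB_neg (n m : Int) (L D : List Int) (hn0 : n ≤ 0) :
    find_peacekeeping_mission_interval_alt n m L D = "NO" := by
  unfold find_peacekeeping_mission_interval_alt
  exact if_neg (fun h => absurd h.1 (by omega))

theorem altB_pos (n m : Int) (L D : List Int) (hn0 : 0 < n)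
    (hn : n ≤ L.length) (hm : 0 ≤ m) (hmD : m ≤ D.length) :
    find_peacekeeping_mission_interval_alt n m L D
      = if pvSat m D (L.take n.toNat) = m.toNat then "YES" else "NO" := by
  unfold find_peacekeeping_mission_interval_alt
  have hcnt := cntB_getD n L hn
  have hiff : ((PySem.List.pyRange 0 m 1).all
      (fun j => decide (PySem.List.pyGetD D j 0 ≤
        ((PySem.List.pyRange 0 n 1).foldl
          (fun d i =>
            let c := PySem.List.pyGetD L i 0
            d.insert c (d.getD c 0 + 1)) PySem.Dict.empty).getD (j + 1) 0)) = true)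
      ↔ pvSat m D (L.take n.toNat) = m.toNat := by
    rw [List.all_eq_true]
    constructor
    · intro hall
      have hfl : ∀ j ∈ List.range m.toNat,
          (fun j => decide (D.getD j 0 ≤ ((L.take n.toNat).count ((j : Int) + 1) : Int))) j
            = true := by
        intro j hj
        have hjm : j < m.toNat := by simpa using hj
        have := hall (j : Int) (by rw [PySem.List.mem_pyRange_one]; omega)
        rw [hcnt ((j : Int) + 1)] at this
        rw [PySem.List.pyGetD_eq_getElem _ _ (by omega) (by omega),
            ← List.getD_eq_getElem _ 0 (by omega : (j:Int).toNat < D.length)] at this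
        simpa using this
      have : ((List.range m.toNat).filter
          (fun j => D.getD j 0 ≤ ((L.take n.toNat).count ((j : Int) + 1) : Int))).length
            = (List.range m.toNat).length :=
        List.length_filter_eq_length_iff.mpr hfl
      simpa [pvSat] using this
    · intro hfeas
      intro j hj
      rw [PySem.List.mem_pyRange_one] at hj
      have hall := List.length_filter_eq_length_iff.mp
        (by simpa [pvSat] using hfeas :
          ((List.range m.toNat).filter
            (fun j => D.getD j 0 ≤ ((L.take n.toNat).count ((j : Int) + 1) : Int))).length
              = (List.range m.toNat).length)
      have := hall j.toNat (by simp; omega)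
      rw [hcnt (j + 1)]
      rw [PySem.List.pyGetD_eq_getElem _ _ (by omega) (by omega),
          ← List.getD_eq_getElem _ 0 (by omega : j.toNat < D.length)]
      simp only [decide_eq_true_eq] at this ⊢
      have hjc : ((j.toNat : Int)) = j := by omega
      rw [hjc] at this
      exact this
  by_cases hfeas : pvSat m D (L.take n.toNat) = m.toNat
  · rw [if_pos ⟨hn0, hiff.mpr hfeas⟩, if_pos hfeas]
  · rw [if_neg (fun h => hfeas (hiff.mp h.2)), if_neg hfeas]


theorem foldl_yes (L C : List Int) (n m : Int) (l : List Int)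
    (st : Int × Int × Int × Int × List Int) (h : st.2.2.2.1 < (1:Int) <<< 60) :
    (if (l.foldl (pvStepA L C n m) st).2.2.2.1 < (1:Int) <<< 60 then "YES" else "NO")
      = "YES" :=
  if_pos (lt_of_le_of_lt (foldl_ans_le L C n m l st) h)

theorem foldl_no (L C : List Int) (n m : Int) (l : List Int)
    (st : Int × Int × Int × Int × List Int)
    (h1 : st.1 = n) (h2 : st.2.1 < m) (h3 : st.2.2.2.1 = (1:Int) <<< 60) :
    (if (l.foldl (pvStepA L C n m) st).2.2.2.1 < (1:Int) <<< 60 then "YES" else "NO")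
      = "NO" := by
  rw [(foldl_frozen L C n m l st h1 h2).2.2, h3]
  exact if_neg (lt_irrefl _)

theorem A_neg (n m : Int) (L D : List Int) (hn0 : n ≤ 0) :
    find_peacekeeping_mission_interval n m L D = "NO" := by
  unfold find_peacekeeping_mission_interval
  rw [show PySem.List.pyRange 0 n 1 = [] from PySem.List.pyRange_one_eq_nil (by omega)]
  simp only [List.foldl_nil]
  rw [if_neg (lt_irrefl _)]

theorem A_eq (n m : Int) (L D : List Int) (hn0 : 0 < n)
    (hn : n ≤ L.length) (hm : 0 ≤ m) (hmD : m ≤ D.length)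
    (hcol : ∀ c ∈ L.take n.toNat, 1 ≤ c ∧ c ≤ m ∧ c ≤ n)
    (htgt : ∀ d ∈ D.take m.toNat, 0 ≤ d)
    (hn31 : n ≤ 2147483648) :
    find_peacekeeping_mission_interval n m L D
      = if pvSat m D (L.take n.toNat) = m.toNat then "YES" else "NO" := by
  have hINF : ((1:Int) <<< 60) = 1152921504606846976 := by decide
  unfold find_peacekeeping_mission_interval
  · rw [PySem.List.pyRange_one_cons (by omega : (0:Int) < n)]
    simp only [List.foldl_cons]
    have hG0len : (List.replicate (n+1).toNat (0:Int)).length = (n+1).toNat := by simp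
    have hG0 : ∀ c : Int, 1 ≤ c → c ≤ m → c ≤ n →
        PySem.List.pyGetD (List.replicate (n+1).toNat (0:Int)) c 0
          = ((L.take (0:Int).toNat).count c : Int) := by
      intro c h1 h2 h3
      rw [PySem.List.pyGetD_eq_getElem _ _ (by omega) (by simp; omega)]
      simp
    have hsat0 : ((PySem.List.pyRange 1 (m + 1) 1).foldl
        (fun s i => if PySem.List.pyGetD (0 :: D) i 0 = 0 then s + 1 else s) (0 : Int))
          = (pvSat m D (L.take (0:Int).toNat) : Int) := by
      rw [sat0_eq m D hm hmD htgt]; simp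
    obtain ⟨pos', sat', w', G', hrun, h0le, hpn', hsat', hw', hdisj⟩ :=
      whileA_inv L D n m hn hm hmD hcol htgt ((n - 0).toNat) 0 _ 0 _ rfl (le_refl 0)
        (by omega) hG0len hG0 hsat0 (le_refl 0)
    dsimp only [pvStepA]
    simp only [hrun]
    by_cases hfeas : pvSat m D (L.take n.toNat) = m.toNat
    · have hsm : sat' = m := by
        rcases hdisj with h | h
        · exact h
        · rw [hsat', h, hfeas]; omega
      rw [if_pos hsm]
      have hlt : min ((1:Int) <<< 60) w' < (1:Int) <<< 60 := by
        have h1 := min_le_right ((1:Int) <<< 60) w'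
        rw [hINF] at h1 ⊢
        omega
      rw [show (if pvSat m D (L.take n.toNat) = m.toNat then "YES" else "NO")
          = "YES" from if_pos hfeas]
      exact foldl_yes L (0 :: D) n m _ _ (by split_ifs <;> exact hlt)
    · have hsm : sat' ≠ m := by
        intro h
        have h1 : pvSat m D (L.take pos'.toNat) = m.toNat := by
          have := hsat'.symm.trans h
          omega
        have h2 : pvSat m D (L.take pos'.toNat) ≤ pvSat m D (L.take n.toNat) :=
          pvSat_mono m D L pos'.toNat n.toNat (by omega)
        have h3 := pvSat_le m D (L.take n.toNat)
        omega
      have hslt : sat' < m := by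
        have h3 := pvSat_le m D (L.take pos'.toNat)
        omega
      have hposn : pos' = n := by tauto
      rw [if_neg hsm]
      rw [show (if pvSat m D (L.take n.toNat) = m.toNat then "YES" else "NO")
          = "NO" from if_neg hfeas]
      exact foldl_no L (0 :: D) n m _ _
        (by split_ifs <;> exact hposn)
        (by split_ifs <;> first
              | exact hslt
              | exact (by omega : sat' - 1 < m))
        (by split_ifs <;> rfl)

-- ===== VERDICT (by name: the statement is the Claim_ definition above) =====
theorem find_peacekeeping_mission_interval_spec : Claim_equal_find_peacekeeping_mission_interval := by
  unfold Claim_equal_find_peacekeeping_mission_interval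
  intro n m L D hdom hpre
  unfold Spec_find_peacekeeping_mission_interval
  obtain ⟨hmD, hrest⟩ := hpre
  by_cases hn0 : 0 < n
  · obtain ⟨hm, hn, hcol, htgt⟩ := hrest hn0
    have hn31 : n ≤ 2147483648 := by
      unfold Dom_find_peacekeeping_mission_interval at hdom
      simp only [Bool.and_eq_true, pvDomInt, decide_eq_true_eq] at hdom
      exact hdom.1.1.1.2
    rw [A_eq n m L D hn0 hn hm hmD hcol htgt hn31, altB_pos n m L D hn0 hn hm hmD]
  · rw [A_neg n m L D (by omega), altB_neg n m L D (by omega)]
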